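-- pv_equiv track=rewrite | github.com/Hiko115/2021_IA_project_AI-OCR | OCR/main.py | loop
-- ===== SOURCE A (Python) =====
-- totalChar=["HKD","$","."]
--
-- paymentMethod=["卡","八","octo","pus","MAS","VI","銀聯","Unio","現金","Alipay","用"]
--
-- dateCheck=["/","-", "："]
--
-- def loop (temp):
--     brand_temp=True
--     recipt_brand,recipt_total,recipt_paymethod,recipt_Id,recipt_date=[],[],[],[],[]
--
--     for i in range(len(temp)):
--         digitcheck="".join(x for x in temp[i] if x.isdigit())
--         if any(c in temp[i] for c in totalChar):
--             recipt_total.append(i)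
--             brand_temp=False
--             continue
--         if any(c in temp[i] for c in paymentMethod):
--             recipt_paymethod.append(i)
--             brand_temp=False
--             continue
--         if any(c in temp[i] for c in dateCheck):
--             recipt_date.append(i)
--             brand_temp=False
--             continue
--         if len(digitcheck)>=4 and len(temp[i])>4:
--             recipt_Id.append(i)
--             brand_temp=False
--
--         if (brand_temp):
--             recipt_brand.append(i)
--
--     return recipt_brand,recipt_total,recipt_paymethod,recipt_Id,recipt_date
-- ===== SOURCE B (Python) =====
-- totalChar=["HKD","$","."]
--
-- paymentMethod=["卡","八","octo","pus","MAS","VI","銀聯","Unio","現金","Alipay","用"]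
--
-- dateCheck=["/","-", "："]
--
-- def classify(line):
--     """Category of a line: 1 total, 2 paymethod, 4 date, 3 id, 0 uncategorized."""
--     if any(c in line for c in totalChar):
--         return 1
--     if any(c in line for c in paymentMethod):
--         return 2
--     if any(c in line for c in dateCheck):
--         return 4
--     if sum(ch.isdigit() for ch in line) >= 4 and len(line) > 4:
--         return 3
--     return 0
--
-- def loop(temp):
--     cats = list(enumerate(map(classify, temp)))
--     first = next((i for i, c in cats if c != 0), len(temp))
--     return (list(range(first)),
--             [i for i, c in cats if c == 1],
--             [i for i, c in cats if c == 2],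
--             [i for i, c in cats if c == 3],
--             [i for i, c in cats if c == 4])
-- ===== Notes on version B (the rewrite author's own statement) =====
-- stated objective: simpler
-- what changed: Replaces A's stateful flag-and-append loop by a pure per-line classifier mapped once over the lines, after which each category list is a comprehension over the classified sequence and the brand list is the prefix of indices before the first classified line.
import Mathlib
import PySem

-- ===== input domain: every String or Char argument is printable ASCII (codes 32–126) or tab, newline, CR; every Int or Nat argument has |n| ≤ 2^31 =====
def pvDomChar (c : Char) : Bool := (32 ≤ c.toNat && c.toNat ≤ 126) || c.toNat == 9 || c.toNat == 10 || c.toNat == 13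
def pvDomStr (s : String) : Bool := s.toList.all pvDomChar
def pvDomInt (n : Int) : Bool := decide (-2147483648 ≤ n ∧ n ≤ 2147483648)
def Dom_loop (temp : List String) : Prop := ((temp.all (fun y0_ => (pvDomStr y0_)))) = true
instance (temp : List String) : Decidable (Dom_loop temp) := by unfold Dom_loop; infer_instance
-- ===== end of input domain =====

-- B replaces A's stateful flag-and-append loop by a per-line classifier mapped once, with each
-- result list derived from the classified sequence (objective: simpler).

-- module constants shared by Source A and Source B
def totalChar : List String := ["HKD", "$", "."]
def paymentMethod : List String := ["卡", "八", "octo", "pus", "MAS", "VI", "銀聯", "Unio", "現金", "Alipay", "用"]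
def dateCheck : List String := ["/", "-", "："]

-- ===== PORT A =====
-- state = (brand_temp, recipt_brand, recipt_total, recipt_paymethod, recipt_Id, recipt_date)
def loopStep (st : Bool × List Int × List Int × List Int × List Int × List Int)
    (p : Int × String) : Bool × List Int × List Int × List Int × List Int × List Int :=
  let bt := st.1
  let rb := st.2.1
  let rt := st.2.2.1
  let rp := st.2.2.2.1
  let rid := st.2.2.2.2.1
  let rd := st.2.2.2.2.2
  let i := p.1
  let s := p.2
  -- digitcheck = "".join(x for x in temp[i] if x.isdigit()), kept as its list of characters
  let digitcheck := s.toList.filter (fun x => PySem.Chars.isdigit x)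
  if totalChar.any (fun c => PySem.Str.isIn c s) then (false, rb, rt ++ [i], rp, rid, rd)
  else if paymentMethod.any (fun c => PySem.Str.isIn c s) then (false, rb, rt, rp ++ [i], rid, rd)
  else if dateCheck.any (fun c => PySem.Str.isIn c s) then (false, rb, rt, rp, rid, rd ++ [i])
  else
    -- the id branch has no 'continue': brand_temp is re-tested afterwards
    let st2 := if 4 ≤ digitcheck.length ∧ 4 < s.toList.length then (false, rid ++ [i]) else (bt, rid)
    if st2.1 then (st2.1, rb ++ [i], rt, rp, st2.2, rd) else (st2.1, rb, rt, rp, st2.2, rd)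

def loop (temp : List String) : List Int × List Int × List Int × List Int × List Int :=
  let st := (PySem.List.enumerate temp).foldl loopStep (true, [], [], [], [], [])
  (st.2.1, st.2.2.1, st.2.2.2.1, st.2.2.2.2.1, st.2.2.2.2.2)

-- ===== PORT B =====
-- Category of a line: 1 total, 2 paymethod, 4 date, 3 id, 0 uncategorized.
def classify (line : String) : Int :=
  if totalChar.any (fun c => PySem.Str.isIn c line) then 1
  else if paymentMethod.any (fun c => PySem.Str.isIn c line) then 2
  else if dateCheck.any (fun c => PySem.Str.isIn c line) then 4
  else if 4 ≤ line.toList.countP (fun x => PySem.Chars.isdigit x) ∧ 4 < line.toList.length then 3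
  else 0

def loop_alt (temp : List String) : List Int × List Int × List Int × List Int × List Int :=
  let cats := PySem.List.enumerate (temp.map classify)
  let brand := (cats.takeWhile (fun p => p.2 == (0 : Int))).map (fun p => p.1)
  (brand,
   cats.filterMap (fun p => if p.2 == (1 : Int) then some p.1 else none),
   cats.filterMap (fun p => if p.2 == (2 : Int) then some p.1 else none),
   cats.filterMap (fun p => if p.2 == (3 : Int) then some p.1 else none),
   cats.filterMap (fun p => if p.2 == (4 : Int) then some p.1 else none))

-- ===== PRECONDITION & SPEC =====
def Spec_loop (temp : List String) (out : List Int × List Int × List Int × List Int × List Int) : Prop := out = loop_alt temp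
instance (temp : List String) (out : List Int × List Int × List Int × List Int × List Int) : Decidable (Spec_loop temp out) := by unfold Spec_loop; infer_instance

-- ===== CLAIM (what is proved, stated in full; the proofs are below) =====
def Claim_equal_loop : Prop := ∀ (temp : List String), Dom_loop temp → Spec_loop temp (loop temp)

-- ===== LEMMAS AND PROOFS =====

-- A's fold, from an arbitrary state, expressed through B's classifier.
theorem foldA_spec (l : List (Int × String)) (bt : Bool)
    (rb rt rp rid rd : List Int) :
    l.foldl loopStep (bt, rb, rt, rp, rid, rd) =
      (bt && l.all (fun p => classify p.2 == 0),
       rb ++ (if bt then (l.takeWhile (fun p => classify p.2 == 0)).map (fun p => p.1) else []),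
       rt ++ l.filterMap (fun p => if classify p.2 == (1 : Int) then some p.1 else none),
       rp ++ l.filterMap (fun p => if classify p.2 == (2 : Int) then some p.1 else none),
       rid ++ l.filterMap (fun p => if classify p.2 == (3 : Int) then some p.1 else none),
       rd ++ l.filterMap (fun p => if classify p.2 == (4 : Int) then some p.1 else none)) := by
  induction l generalizing bt rb rt rp rid rd with
  | nil => simp
  | cons p l ih =>
    by_cases ht : ∃ c ∈ totalChar, PySem.Chars.isIn c.toList p.2.toList = true
    · simp [List.foldl_cons, loopStep, classify, ht, ih]
    · by_cases hp : ∃ c ∈ paymentMethod, PySem.Chars.isIn c.toList p.2.toList = true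
      · simp [List.foldl_cons, loopStep, classify, ht, hp, ih]
      · by_cases hd : ∃ c ∈ dateCheck, PySem.Chars.isIn c.toList p.2.toList = true
        · simp [List.foldl_cons, loopStep, classify, ht, hp, hd, ih]
        · by_cases hid : 4 ≤ p.2.toList.countP (fun x => PySem.Chars.isdigit x) ∧ 4 < p.2.length
          · have hid' : 4 ≤ (p.2.toList.filter (fun x => PySem.Chars.isdigit x)).length ∧
                4 < p.2.length := by
              simpa [List.countP_eq_length_filter] using hid
            simp [List.foldl_cons, loopStep, classify, ht, hp, hd, hid, hid', ih]
          · have hid' : ¬ (4 ≤ (p.2.toList.filter (fun x => PySem.Chars.isdigit x)).length ∧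
                4 < p.2.length) := by
              simpa [List.countP_eq_length_filter] using hid
            cases bt with
            | false => simp [List.foldl_cons, loopStep, classify, ht, hp, hd, hid, hid', ih]
            | true => simp [List.foldl_cons, loopStep, classify, ht, hp, hd, hid, hid', ih]

-- enumerating a mapped list maps the classifier over the enumeration
theorem enumerate_map (f : String → Int) (xs : List String) (s : Int) :
    PySem.List.enumerate (xs.map f) s =
      (PySem.List.enumerate xs s).map (fun p => (p.1, f p.2)) := by
  induction xs generalizing s with
  | nil => simp [PySem.List.enumerate_nil]
  | cons x xs ih => simp [PySem.List.enumerate_cons, ih]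

-- ===== VERDICT (by name: the statement is the Claim_ definition above) =====
theorem loop_spec : Claim_equal_loop := by
  intro temp _
  show loop temp = loop_alt temp
  simp only [loop, loop_alt, foldA_spec, enumerate_map, List.filterMap_map,
    List.takeWhile_map, List.map_map]
  simp [Function.comp_def]
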